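-- pv_equiv track=rewrite | github.com/JuanJesuses/Python_ejercicios_varios | PROG_FUNCIONAL/ejercicio_7.py | calificaciones
-- ===== SOURCE A (Python) =====
-- def calificaciones(diccionario_notas):
--
--     diccionario_modificado = {}
--
--     for clave, valor in diccionario_notas.items():
--         if valor < 5:
--             diccionario_modificado[clave.upper()] = 'SS'
--         elif valor < 7:
--             diccionario_modificado[clave.upper()] = 'AP'
--         elif valor < 9:
--             diccionario_modificado[clave.upper()] = 'NT'
--         elif valor < 10:
--             diccionario_modificado[clave.upper()] = 'SB'
--         else:
--             diccionario_modificado[clave.upper()] = 'MH'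
--
--     return diccionario_modificado
-- ===== SOURCE B (Python) =====
-- def calificaciones(diccionario_notas):
--     # Two staged passes: first collapse duplicate (uppercased) keys keeping the last
--     # numeric grade, then translate each surviving grade by binary search in a sorted
--     # threshold table.
--     thresholds = [5, 7, 9, 10]
--     labels = ['SS', 'AP', 'NT', 'SB', 'MH']
--
--     def bisect_right(x):
--         lo, hi = 0, len(thresholds)
--         while lo < hi:
--             mid = (lo + hi) // 2
--             if x < thresholds[mid]:
--                 hi = mid
--             else:
--                 lo = mid + 1
--         return lo
--
--     ultimas_notas = {clave.upper(): valor for clave, valor in diccionario_notas.items()}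
--     return {clave: labels[bisect_right(valor)] for clave, valor in ultimas_notas.items()}
-- ===== Notes on version B (the rewrite author's own statement) =====
-- stated objective: alternative
-- what changed: Replaces A's single pass with an inline if/elif cascade by two staged passes: first a dedup pass that keeps only the last numeric grade per uppercased key, then a labelling pass that translates each surviving grade by hand-written binary search in a sorted threshold table.
import Mathlib
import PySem

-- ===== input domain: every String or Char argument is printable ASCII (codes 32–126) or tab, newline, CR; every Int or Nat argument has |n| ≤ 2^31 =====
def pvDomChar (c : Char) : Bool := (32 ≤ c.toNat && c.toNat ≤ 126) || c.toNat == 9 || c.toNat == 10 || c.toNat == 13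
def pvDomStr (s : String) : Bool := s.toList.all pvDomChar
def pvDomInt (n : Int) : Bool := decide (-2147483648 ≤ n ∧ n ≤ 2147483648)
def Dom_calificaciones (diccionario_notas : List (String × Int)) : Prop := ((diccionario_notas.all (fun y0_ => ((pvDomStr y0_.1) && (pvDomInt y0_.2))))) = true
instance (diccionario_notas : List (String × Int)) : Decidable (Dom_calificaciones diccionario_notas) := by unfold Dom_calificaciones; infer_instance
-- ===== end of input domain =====

-- B replaces A's single pass with its inline if/elif cascade by two staged passes:
-- first collapse duplicate uppercased keys keeping the last grade, then translate each
-- surviving grade by binary search in a sorted threshold table (alternative, same cost).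

-- ===== PORT A =====
def calificaciones (diccionario_notas : List (String × Int)) : List (String × String) :=
  (diccionario_notas.foldl
    (fun diccionario_modificado kv =>
      let clave := kv.1
      let valor := kv.2
      if valor < 5 then diccionario_modificado.insert (PySem.Str.upper clave) "SS"
      else if valor < 7 then diccionario_modificado.insert (PySem.Str.upper clave) "AP"
      else if valor < 9 then diccionario_modificado.insert (PySem.Str.upper clave) "NT"
      else if valor < 10 then diccionario_modificado.insert (PySem.Str.upper clave) "SB"
      else diccionario_modificado.insert (PySem.Str.upper clave) "MH")
    PySem.Dict.empty).items

-- ===== PORT B =====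
-- Source B's hand-written bisect_right loop, transcribed step for step
-- (the list index thresholds[mid] is always in range: lo ≤ mid < hi ≤ len, so getD is exact)
def pvBisectLoop (thresholds : List Int) (x : Int) (lo hi : Nat) : Nat :=
  if _h : lo < hi then
    let mid := (lo + hi) / 2
    if x < thresholds.getD mid 0 then pvBisectLoop thresholds x lo mid
    else pvBisectLoop thresholds x (mid + 1) hi
  else lo
termination_by hi - lo
decreasing_by all_goals omega

def calificaciones_alt (diccionario_notas : List (String × Int)) : List (String × String) :=
  let thresholds : List Int := [5, 7, 9, 10]
  let labels : List String := ["SS", "AP", "NT", "SB", "MH"]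
  -- pass 1: {clave.upper(): valor for ...} — last grade per uppercased key
  let ultimas_notas :=
    diccionario_notas.foldl
      (fun d kv => d.insert (PySem.Str.upper kv.1) kv.2) PySem.Dict.empty
  -- pass 2: {clave: labels[bisect_right(valor)] for ...}  (index is in 0..4, in range)
  (ultimas_notas.items.foldl
    (fun d kv => d.insert kv.1 (labels.getD (pvBisectLoop thresholds kv.2 0 4) "")) PySem.Dict.empty).items

-- ===== PRECONDITION & SPEC =====
def Spec_calificaciones (diccionario_notas : List (String × Int)) (out : List (String × String)) : Prop := out = calificaciones_alt diccionario_notas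
instance (diccionario_notas : List (String × Int)) (out : List (String × String)) : Decidable (Spec_calificaciones diccionario_notas out) := by unfold Spec_calificaciones; infer_instance

-- ===== CLAIM (what is proved, stated in full; the proofs are below) =====
def Claim_equal_calificaciones : Prop := ∀ (diccionario_notas : List (String × Int)), Dom_calificaciones diccionario_notas → Spec_calificaciones diccionario_notas (calificaciones diccionario_notas)

-- ===== LEMMAS AND PROOFS =====

-- the label B looks up by binary search, as a function
def pvLabel (v : Int) : String :=
  (["SS", "AP", "NT", "SB", "MH"] : List String).getD (pvBisectLoop [5, 7, 9, 10] v 0 4) ""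

-- B's binary-search lookup agrees with A's strict-< cascade
lemma pvLabel_eq (v : Int) :
    pvLabel v = (if v < 5 then "SS" else if v < 7 then "AP" else if v < 9 then "NT"
      else if v < 10 then "SB" else "MH") := by
  unfold pvLabel
  by_cases h9 : v < 9
  · by_cases h5 : v < 5
    · simp [pvBisectLoop, h9, h5, show v < 7 by omega]
    · by_cases h7 : v < 7
      · simp [pvBisectLoop, h9, h5, h7]
      · simp [pvBisectLoop, h9, h5, h7]
  · by_cases h10 : v < 10
    · simp [pvBisectLoop, h10, h9, show ¬ v < 5 by omega, show ¬ v < 7 by omega]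
    · simp [pvBisectLoop, h10, h9, show ¬ v < 5 by omega, show ¬ v < 7 by omega]

-- value-mapping a dict: apply pvLabel to every stored value, keeping keys and order
def pvMapVal (d : PySem.Dict String Int) : PySem.Dict String String :=
  PySem.Dict.mk (d.items.map (fun p => (p.1, pvLabel p.2)))

lemma pvMapVal_contains (d : PySem.Dict String Int) (k : String) :
    (pvMapVal d).contains k = d.contains k := by
  unfold pvMapVal PySem.Dict.contains
  simp [Function.comp_def]

lemma pvMapVal_insert (d : PySem.Dict String Int) (k : String) (v : Int) :
    pvMapVal (d.insert k v) = (pvMapVal d).insert k (pvLabel v) := by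
  apply PySem.Dict.ext
  by_cases hc : d.contains k = true
  · rw [PySem.Dict.items_insert_of_contains _ _ (by rw [pvMapVal_contains]; exact hc)]
    simp only [pvMapVal]
    rw [PySem.Dict.items_insert_of_contains _ _ hc]
    simp only [List.map_map]
    apply List.map_congr_left
    intro p _
    by_cases hp : p.1 = k <;> simp [hp]
  · rw [PySem.Dict.items_insert_of_not_contains _ _ (by rw [pvMapVal_contains]; simpa using hc)]
    simp only [pvMapVal]
    rw [PySem.Dict.items_insert_of_not_contains _ _ (by simpa using hc)]
    simp

-- A's single labelling pass is pass 1 of B followed by value-mapping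
lemma foldA_eq_mapVal (l : List (String × Int)) : ∀ (d : PySem.Dict String Int),
    l.foldl (fun d kv => d.insert (PySem.Str.upper kv.1) (pvLabel kv.2)) (pvMapVal d)
      = pvMapVal (l.foldl (fun d kv => d.insert (PySem.Str.upper kv.1) kv.2) d) := by
  induction l with
  | nil => intro d; rfl
  | cons kv t ih =>
    intro d
    simp only [List.foldl_cons, ← pvMapVal_insert, ih]

-- ===== VERDICT (by name: the statement is the Claim_ definition above) =====
theorem calificaciones_spec : Claim_equal_calificaciones := by
  intro l _
  unfold Spec_calificaciones calificaciones calificaciones_alt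
  simp only []
  -- rewrite A's cascade into the pvLabel form
  have hA :
      (fun (d : PySem.Dict String String) (kv : String × Int) =>
        let clave := kv.1
        let valor := kv.2
        if valor < 5 then d.insert (PySem.Str.upper clave) "SS"
        else if valor < 7 then d.insert (PySem.Str.upper clave) "AP"
        else if valor < 9 then d.insert (PySem.Str.upper clave) "NT"
        else if valor < 10 then d.insert (PySem.Str.upper clave) "SB"
        else d.insert (PySem.Str.upper clave) "MH")
      = (fun (d : PySem.Dict String String) (kv : String × Int) =>
          d.insert (PySem.Str.upper kv.1) (pvLabel kv.2)) := by
    funext d kv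
    rw [pvLabel_eq kv.2]
    simp only []
    split_ifs <;> rfl
  rw [hA]
  have e1 : l.foldl (fun d kv => d.insert (PySem.Str.upper kv.1) (pvLabel kv.2))
      (PySem.Dict.empty : PySem.Dict String String)
      = pvMapVal (l.foldl (fun d kv => d.insert (PySem.Str.upper kv.1) kv.2) PySem.Dict.empty) := by
    rw [show (PySem.Dict.empty : PySem.Dict String String) = pvMapVal PySem.Dict.empty from rfl]
    exact foldA_eq_mapVal l PySem.Dict.empty
  rw [e1]
  have hnd : ((l.foldl (fun d kv => d.insert (PySem.Str.upper kv.1) kv.2)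
      PySem.Dict.empty).items.map (fun p => p.1)).Nodup := by
    exact PySem.Dict.nodup_keys_foldl_insert_key l (fun kv => PySem.Str.upper kv.1)
      (fun d kv => kv.2) PySem.Dict.empty PySem.Dict.nodup_keys_empty
  rw [PySem.Dict.items_foldl_insert_fresh _ _ _ _ (by intro a _; exact PySem.Dict.contains_empty _) hnd]
  simp [pvMapVal, pvLabel, PySem.Dict.empty]
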